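-- pv_equiv track=rewrite | github.com/hghyhghy/Codechef-Coding-Ninja | Desktop/DSA/T44/5.py | pair_with_difference_equal_to_k
-- ===== SOURCE A (Python) =====
-- def pair_with_difference_equal_to_k(array,k):
--
--     n=len(array)
--     store=[]
--
--     for i in range(n):
--
--         for j in range(i+1,n):
--
--             if abs(array[i]-array[j]) == k:
--                 store.append([array[i],array[j]])
--
--     return store
-- ===== SOURCE B (Python) =====
-- def pair_with_difference_equal_to_k(array, k):
--     # Index values once (value -> increasing indices), then per i look up only
--     # the two candidate values v-k / v+k instead of scanning the whole suffix.
--     if k < 0: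
--         return []
--     pos = {}
--     for i, v in enumerate(array):
--         pos.setdefault(v, []).append(i)
--     out = []
--     for i, v in enumerate(array):
--         if k == 0:
--             js = [j for j in pos[v] if j > i]
--         else:
--             js = sorted([j for j in pos.get(v - k, []) if j > i]
--                         + [j for j in pos.get(v + k, []) if j > i])
--         for j in js:
--             out.append([v, array[j]])
--     return out
-- ===== Notes on version B (the rewrite author's own statement) =====
-- stated objective: faster
-- what changed: Replaced the quadratic all-pairs suffix scan by a hash index value->sorted index list built once; each i looks up only the two candidate values v-k and v+k (one for k=0, none for k<0) and merges their later indices.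
import Mathlib
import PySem

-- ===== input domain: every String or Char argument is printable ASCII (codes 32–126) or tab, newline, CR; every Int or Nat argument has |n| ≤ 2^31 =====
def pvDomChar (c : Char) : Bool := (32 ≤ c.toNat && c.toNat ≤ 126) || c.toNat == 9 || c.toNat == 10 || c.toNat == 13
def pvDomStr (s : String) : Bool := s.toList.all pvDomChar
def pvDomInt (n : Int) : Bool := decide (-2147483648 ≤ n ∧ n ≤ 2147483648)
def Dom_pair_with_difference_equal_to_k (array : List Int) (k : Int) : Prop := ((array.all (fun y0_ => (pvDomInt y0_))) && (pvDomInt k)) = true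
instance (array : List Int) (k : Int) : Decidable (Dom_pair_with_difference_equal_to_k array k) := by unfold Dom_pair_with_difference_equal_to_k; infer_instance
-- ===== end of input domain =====

-- B replaces A's O(n^2) all-pairs scan by a value->indices hash index consulted at v±k per i (faster).

-- ===== PORT A =====
def pair_with_difference_equal_to_k (array : List Int) (k : Int) : List (List Int) :=
  let n : Int := (array.length : Int)
  (PySem.List.pyRange 0 n 1).foldl (fun store i =>
    (PySem.List.pyRange (i + 1) n 1).foldl (fun store j =>
      if |PySem.List.pyGetD array i 0 - PySem.List.pyGetD array j 0| = k then
        store ++ [[PySem.List.pyGetD array i 0, PySem.List.pyGetD array j 0]]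
      else store) store) []

-- ===== PORT B =====
-- pos = {}; for i, v in enumerate(array): pos.setdefault(v, []).append(i)
def pairPosIndex (array : List Int) : PySem.Dict Int (List Int) :=
  (PySem.List.enumerate array 0).foldl
    (fun d p => d.modify p.2 [] (fun l => l ++ [p.1])) PySem.Dict.empty

def pair_with_difference_equal_to_k_alt (array : List Int) (k : Int) : List (List Int) :=
  if k < 0 then []
  else
    let pos := pairPosIndex array
    (PySem.List.enumerate array 0).foldl (fun out p =>
      let i := p.1
      let v := p.2
      let js :=
        if k = 0 then (pos.getD v []).filter (fun j => decide (i < j))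
        else
          PySem.List.sorted
            ((pos.getD (v - k) []).filter (fun j => decide (i < j)) ++
             (pos.getD (v + k) []).filter (fun j => decide (i < j)))
            (fun x => x) false
      js.foldl (fun out j => out ++ [[v, PySem.List.pyGetD array j 0]]) out) []

-- ===== PRECONDITION & SPEC =====
def Spec_pair_with_difference_equal_to_k (array : List Int) (k : Int) (out : List (List Int)) : Prop := out = pair_with_difference_equal_to_k_alt array k
instance (array : List Int) (k : Int) (out : List (List Int)) : Decidable (Spec_pair_with_difference_equal_to_k array k out) := by unfold Spec_pair_with_difference_equal_to_k; infer_instance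

-- ===== CLAIM (what is proved, stated in full; the proofs are below) =====
def Claim_equal_pair_with_difference_equal_to_k : Prop := ∀ (array : List Int) (k : Int), Dom_pair_with_difference_equal_to_k array k → Spec_pair_with_difference_equal_to_k array k (pair_with_difference_equal_to_k array k)

-- ===== LEMMAS AND PROOFS =====

lemma pvGroupIdx (l : List (Int × Int)) (d : PySem.Dict Int (List Int)) (c : Int) :
    (l.foldl (fun d p => d.modify p.2 [] (fun t => t ++ [p.1])) d).getD c []
      = d.getD c [] ++ (l.filter (fun p => p.2 == c)).map Prod.fst := by
  induction l generalizing d with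
  | nil => simp
  | cons p t ih =>
    simp only [List.foldl_cons, ih, List.filter_cons]
    rw [PySem.Dict.getD_modify]
    by_cases h : c = p.2
    · simp [h, List.append_assoc]
    · have hb : (p.2 == c) = false := by simpa using fun hh => h (Eq.symm hh)
      simp [h, hb]

lemma pvFilterGt (n i : Int) (hi : 0 ≤ i) (q : Int → Bool) :
    ((PySem.List.pyRange 0 n).filter q).filter (fun j => decide (i < j))
      = (PySem.List.pyRange (i+1) n).filter q := by
  rw [List.filter_filter]
  by_cases h : i + 1 ≤ n
  · rw [PySem.List.pyRange_one_append 0 (i+1) n (by omega) h, List.filter_append]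
    have h1 : (PySem.List.pyRange 0 (i+1)).filter (fun j => decide (i < j) && q j) = [] := by
      rw [List.filter_eq_nil_iff]
      intro j hj
      have := PySem.List.mem_pyRange_one.mp hj
      simp only [Bool.and_eq_true, decide_eq_true_eq, not_and]
      intro h2; omega
    rw [h1, List.nil_append]
    apply List.filter_congr
    intro j hj
    have := PySem.List.mem_pyRange_one.mp hj
    simp [show i < j by omega]
  · have e1 : PySem.List.pyRange (i+1) n = [] := PySem.List.pyRange_one_eq_nil (by omega)
    rw [e1, List.filter_nil, List.filter_eq_nil_iff]
    intro j hj
    have := PySem.List.mem_pyRange_one.mp hj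
    simp only [Bool.and_eq_true, decide_eq_true_eq, not_and]
    intro h2; omega

lemma pvPermFilterOr {α : Type} (p q : α → Bool) (l : List α)
    (h : ∀ x ∈ l, ¬(p x = true ∧ q x = true)) :
    (l.filter (fun x => p x || q x)).Perm (l.filter p ++ l.filter q) := by
  induction l with
  | nil => simp
  | cons x t ih =>
    have ht := ih (fun y hy => h y (List.mem_cons_of_mem _ hy))
    simp only [List.filter_cons]
    by_cases hp : p x = true
    · have hq : q x = false := by
        cases hpq : q x
        · rfl
        · exact absurd ⟨hp, hpq⟩ (h x (List.mem_cons_self ..))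
      simp only [hp, hq, Bool.true_or, if_true, if_false, Bool.false_eq_true]
      simpa using ht.cons x
    · by_cases hq : q x = true
      · simp only [hp, hq, Bool.or_true, Bool.false_eq_true, if_false, if_true]
        exact (ht.cons x).trans List.perm_middle.symm
      · simp only [hp, hq, Bool.or_self, Bool.false_eq_true, if_false]
        simpa [hp, hq] using ht

lemma pvFoldlFlat {α β γ : Type} (g : α → List β) (f : α → β → γ) (l : List α) (acc : List γ) :
    l.foldl (fun out i => (g i).foldl (fun out j => out ++ [f i j]) out) acc
      = acc ++ l.flatMap (fun i => (g i).map (f i)) := by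
  simp only [PySem.List.foldl_append_singleton_eq_map, PySem.List.foldl_append_eq_flatMap]

lemma pvFlatMapCongr {α β : Type} {l : List α} {f g : α → List β}
    (h : ∀ x ∈ l, f x = g x) : l.flatMap f = l.flatMap g := by
  induction l with
  | nil => rfl
  | cons x t ih =>
    simp only [List.flatMap_cons, h x (List.mem_cons_self ..),
      ih (fun y hy => h y (List.mem_cons_of_mem _ hy))]

lemma pvPosIndexGetD (array : List Int) (c : Int) :
    (pairPosIndex array).getD c []
      = (PySem.List.pyRange 0 (((array.length : Int)))).filter
          (fun j => PySem.List.pyGetD array j 0 == c) := by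
  unfold pairPosIndex
  rw [pvGroupIdx, PySem.List.enumerate_eq_map_pyRange array 0]
  simp [List.filter_map, Function.comp_def]

lemma pvInnerA (array : List Int) (k : Int) (l : List Int) (acc : List (List Int)) :
    l.foldl (fun store i =>
      (PySem.List.pyRange (i+1) ((array.length : Int))).foldl (fun store j =>
        if |PySem.List.pyGetD array i 0 - PySem.List.pyGetD array j 0| = k then
          store ++ [[PySem.List.pyGetD array i 0, PySem.List.pyGetD array j 0]]
        else store) store) acc
    = acc ++ l.flatMap (fun i =>
        ((PySem.List.pyRange (i+1) ((array.length : Int))).filter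
          (fun j => decide (|PySem.List.pyGetD array i 0 - PySem.List.pyGetD array j 0| = k))).map
          (fun j => [PySem.List.pyGetD array i 0, PySem.List.pyGetD array j 0])) := by
  simp only [PySem.List.foldl_append_ite, PySem.List.foldl_append_eq_flatMap]

lemma pvJsEq (array : List Int) (k i : Int) (hk : 0 ≤ k) (hi : 0 ≤ i) :
    (if k = 0 then
        ((pairPosIndex array).getD (PySem.List.pyGetD array i 0) []).filter (fun j => decide (i < j))
      else
        PySem.List.sorted
          (((pairPosIndex array).getD (PySem.List.pyGetD array i 0 - k) []).filter (fun j => decide (i < j)) ++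
           ((pairPosIndex array).getD (PySem.List.pyGetD array i 0 + k) []).filter (fun j => decide (i < j)))
          (fun x => x) false)
    = (PySem.List.pyRange (i+1) (((array.length : Int)))).filter
        (fun j => decide (|PySem.List.pyGetD array i 0 - PySem.List.pyGetD array j 0| = k)) := by
  by_cases hk0 : k = 0
  · simp only [hk0, if_true]
    rw [pvPosIndexGetD, pvFilterGt _ _ hi]
    apply List.filter_congr
    intro j _
    rw [Bool.eq_iff_iff]
    simp only [beq_iff_eq, decide_eq_true_eq]
    rw [eq_comm, abs_eq_zero, sub_eq_zero, eq_comm]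
  · simp only [hk0, if_false]
    have hT : (PySem.List.pyRange (i+1) (((array.length : Int)))).filter
        (fun j => decide (|PySem.List.pyGetD array i 0 - PySem.List.pyGetD array j 0| = k))
      = (PySem.List.pyRange (i+1) (((array.length : Int)))).filter
        (fun j => (PySem.List.pyGetD array j 0 == PySem.List.pyGetD array i 0 - k) ||
                  (PySem.List.pyGetD array j 0 == PySem.List.pyGetD array i 0 + k)) := by
      apply List.filter_congr
      intro j _
      rw [Bool.eq_iff_iff]
      simp only [beq_iff_eq, Bool.or_eq_true, decide_eq_true_eq]
      rw [abs_eq hk]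
      omega
    rw [hT, pvPosIndexGetD, pvPosIndexGetD, pvFilterGt _ _ hi, pvFilterGt _ _ hi]
    exact PySem.List.sorted_eq_of_perm_of_pairwise_lt _ _ _
      (pvPermFilterOr _ _ _ (by
        intro x hx hand
        simp only [beq_iff_eq] at hand
        omega))
      (List.Pairwise.sublist List.filter_sublist (PySem.List.pairwise_lt_pyRange_one _ _))

lemma pvAEq (array : List Int) (k : Int) :
    pair_with_difference_equal_to_k array k
      = (PySem.List.pyRange 0 ((array.length : Int))).flatMap (fun i =>
          ((PySem.List.pyRange (i+1) ((array.length : Int))).filter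
            (fun j => decide (|PySem.List.pyGetD array i 0 - PySem.List.pyGetD array j 0| = k))).map
            (fun j => [PySem.List.pyGetD array i 0, PySem.List.pyGetD array j 0])) := by
  simp only [pair_with_difference_equal_to_k]
  rw [pvInnerA, List.nil_append]

lemma pvBEq (array : List Int) (k : Int) (hk : ¬ k < 0) :
    pair_with_difference_equal_to_k_alt array k
      = (PySem.List.pyRange 0 ((array.length : Int))).flatMap (fun i =>
          (if k = 0 then
              ((pairPosIndex array).getD (PySem.List.pyGetD array i 0) []).filter (fun j => decide (i < j))
            else
              PySem.List.sorted
                (((pairPosIndex array).getD (PySem.List.pyGetD array i 0 - k) []).filter (fun j => decide (i < j)) ++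
                 ((pairPosIndex array).getD (PySem.List.pyGetD array i 0 + k) []).filter (fun j => decide (i < j)))
                (fun x => x) false).map
            (fun j => [PySem.List.pyGetD array i 0, PySem.List.pyGetD array j 0])) := by
  simp only [pair_with_difference_equal_to_k_alt, if_neg hk]
  rw [PySem.List.enumerate_eq_map_pyRange array 0, List.foldl_map]
  rw [pvFoldlFlat, List.nil_append]
  simp

-- ===== VERDICT (by name: the statement is the Claim_ definition above) =====
theorem pair_with_difference_equal_to_k_spec : Claim_equal_pair_with_difference_equal_to_k := by
  intro array k _
  unfold Spec_pair_with_difference_equal_to_k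
  by_cases hk : k < 0
  · rw [pvAEq]
    simp only [pair_with_difference_equal_to_k_alt, if_pos hk]
    rw [pvFlatMapCongr (g := fun _ => ([] : List (List Int)))]
    · simp
    · intro i _
      rw [List.filter_eq_nil_iff.mpr, List.map_nil]
      intro j _
      simp only [decide_eq_true_eq]
      have := abs_nonneg (PySem.List.pyGetD array i 0 - PySem.List.pyGetD array j 0)
      omega
  · rw [pvAEq, pvBEq array k hk]
    apply pvFlatMapCongr
    intro i hi
    have hi0 : 0 ≤ i := (PySem.List.mem_pyRange_one.mp hi).1
    rw [pvJsEq array k i (by omega) hi0]
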